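-- pv_equiv track=rewrite | github.com/naserhosseini/Spark_Mini_Project | Spark_Mini_Project.py | populate_make
-- ===== SOURCE A (Python) =====
-- def populate_make(line):
--     i = 0
--     make=''
--     model=''
--     x=[]
--     for n in line:
--         for m in n:
--             i += 1
--             if i==1:
--                 s=m
--             if i == 2:
--                 if len(m)>0:
--                     make = m
--             if i==3:
--                 if len(m)>0:
--                     model= m
--                     x.append((s,make,model))
--                 else:
--                     x.append((s,make,model))
--         else:
--             i = 0
--     return x
-- ===== SOURCE B (Python) =====
-- def populate_make(line):
--     make = ''
--     model = ''
--     x = []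
--     for n in line:
--         if len(n) >= 2 and len(n[1]) > 0:
--             make = n[1]
--         if len(n) >= 3:
--             if len(n[2]) > 0:
--                 model = n[2]
--             x.append((n[0], make, model))
--     return x
-- ===== Notes on version B (the rewrite author's own statement) =====
-- stated objective: simpler
-- what changed: B replaces A's nested element loop with a per-record position counter by a single flat loop over records using direct guarded indexing n[0]/n[1]/n[2], preserving the carry-over of make/model across records.
import Mathlib
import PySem

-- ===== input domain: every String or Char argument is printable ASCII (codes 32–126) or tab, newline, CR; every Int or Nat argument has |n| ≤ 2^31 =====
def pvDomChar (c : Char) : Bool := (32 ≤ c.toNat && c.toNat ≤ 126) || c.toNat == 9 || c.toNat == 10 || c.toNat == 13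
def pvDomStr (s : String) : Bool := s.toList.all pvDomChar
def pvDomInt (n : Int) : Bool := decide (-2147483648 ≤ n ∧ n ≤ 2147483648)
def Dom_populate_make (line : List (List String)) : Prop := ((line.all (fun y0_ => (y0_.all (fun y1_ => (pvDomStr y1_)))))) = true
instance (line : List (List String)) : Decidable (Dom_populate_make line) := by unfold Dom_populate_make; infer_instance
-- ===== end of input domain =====

-- B replaces A's nested element loop with a counter by direct guarded indexing per record (simpler decomposition, same cost).

-- ===== PORT A =====
-- state: (i, s, make, model, x) — the loop variables of A
def pvStepA (st : Nat × String × String × String × List (String × String × String))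
    (m : String) : Nat × String × String × String × List (String × String × String) :=
  let i := st.1 + 1
  let s := if i = 1 then m else st.2.1
  let make := if i = 2 ∧ PySem.Str.len m > 0 then m else st.2.2.1
  if i = 3 then
    if PySem.Str.len m > 0 then (i, s, make, m, st.2.2.2.2 ++ [(s, make, m)])
    else (i, s, make, st.2.2.2.1, st.2.2.2.2 ++ [(s, make, st.2.2.2.1)])
  else (i, s, make, st.2.2.2.1, st.2.2.2.2)

-- for-else: i is reset to 0 after each record
def pvOuterA (st : Nat × String × String × String × List (String × String × String))
    (n : List String) : Nat × String × String × String × List (String × String × String) :=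
  let st' := n.foldl pvStepA st
  (0, st'.2)

def populate_make (line : List (List String)) : List (String × String × String) :=
  (line.foldl pvOuterA
    ((0, "", "", "", []) : Nat × String × String × String × List (String × String × String))).2.2.2.2

-- ===== PORT B =====
-- state: (make, model, x)
def pvStepB (st : String × String × List (String × String × String)) (n : List String) :
    String × String × List (String × String × String) :=
  let make := if 2 ≤ n.length ∧ PySem.Str.len (n.getD 1 "") > 0 then n.getD 1 "" else st.1
  if 3 ≤ n.length then
    let model := if PySem.Str.len (n.getD 2 "") > 0 then n.getD 2 "" else st.2.1
    (make, model, st.2.2 ++ [(n.getD 0 "", make, model)])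
  else (make, st.2.1, st.2.2)

def populate_make_alt (line : List (List String)) : List (String × String × String) :=
  (line.foldl pvStepB ("", "", [])).2.2

-- ===== PRECONDITION & SPEC =====
def Spec_populate_make (line : List (List String)) (out : List (String × String × String)) : Prop := out = populate_make_alt line
instance (line : List (List String)) (out : List (String × String × String)) : Decidable (Spec_populate_make line out) := by unfold Spec_populate_make; infer_instance

-- ===== CLAIM (what is proved, stated in full; the proofs are below) =====
def Claim_equal_populate_make : Prop := ∀ (line : List (List String)), Dom_populate_make line → Spec_populate_make line (populate_make line)

-- ===== LEMMAS AND PROOFS =====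

-- once i ≥ 3, further elements of the record change nothing but the counter
theorem pvStepA_tail (rest : List String) (i : Nat) (s make model : String)
    (x : List (String × String × String)) (h : 3 ≤ i) :
    List.foldl pvStepA (i, s, make, model, x) rest = (i + rest.length, s, make, model, x) := by
  induction rest generalizing i with
  | nil => simp
  | cons a t ih =>
      have h1 : ¬ i + 1 = 1 := by omega
      have h2 : ¬ (i + 1 = 2 ∧ PySem.Str.len a > 0) := by rintro ⟨h2, -⟩; omega
      have h3 : ¬ i + 1 = 3 := by omega
      simp only [List.foldl_cons, pvStepA, if_neg h1, if_neg h2, if_neg h3]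
      rw [ih (i + 1) (by omega)]
      simp; omega

-- one record of A (starting at i = 0) updates (make, model, x) exactly as pvStepB
theorem pvRecord (n : List String) (s make model : String)
    (x : List (String × String × String)) :
    (List.foldl pvStepA (0, s, make, model, x) n).2.2 = pvStepB (make, model, x) n := by
  match n with
  | [] => simp [pvStepB]
  | [a] =>
      simp [pvStepA, pvStepB]
  | [a, b] =>
      by_cases hb : 0 < b.length <;>
        simp [pvStepA, pvStepB, PySem.Str.len, hb]
  | a :: b :: c :: rest =>
      by_cases hb : 0 < b.length <;> by_cases hc : 0 < c.length <;>
        simp [pvStepA, pvStepB, PySem.Str.len, hb, hc, pvStepA_tail rest 3, List.getD]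

-- the whole folds agree on the (make, model, x) components
theorem pvMain (line : List (List String)) (s make model : String)
    (x : List (String × String × String)) :
    (List.foldl pvOuterA (0, s, make, model, x) line).2.2 =
      List.foldl pvStepB (make, model, x) line := by
  induction line generalizing s make model x with
  | nil => rfl
  | cons n t ih =>
      have h := pvRecord n s make model x
      calc (List.foldl pvOuterA (0, s, make, model, x) (n :: t)).2.2
          = (List.foldl pvOuterA
              ((0 : Nat), (List.foldl pvStepA (0, s, make, model, x) n).2.1,
                (List.foldl pvStepA (0, s, make, model, x) n).2.2.1,
                (List.foldl pvStepA (0, s, make, model, x) n).2.2.2.1,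
                (List.foldl pvStepA (0, s, make, model, x) n).2.2.2.2) t).2.2 := rfl
        _ = List.foldl pvStepB
              ((List.foldl pvStepA (0, s, make, model, x) n).2.2.1,
                (List.foldl pvStepA (0, s, make, model, x) n).2.2.2.1,
                (List.foldl pvStepA (0, s, make, model, x) n).2.2.2.2) t := ih _ _ _ _
        _ = List.foldl pvStepB (pvStepB (make, model, x) n) t := by
              rw [show ((List.foldl pvStepA (0, s, make, model, x) n).2.2.1,
                    (List.foldl pvStepA (0, s, make, model, x) n).2.2.2.1,
                    (List.foldl pvStepA (0, s, make, model, x) n).2.2.2.2)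
                  = pvStepB (make, model, x) n from h]
        _ = List.foldl pvStepB (make, model, x) (n :: t) := rfl

-- ===== VERDICT (by name: the statement is the Claim_ definition above) =====
theorem populate_make_spec : Claim_equal_populate_make := by
  intro line _
  unfold Spec_populate_make populate_make populate_make_alt
  have h := pvMain line "" "" "" []
  exact congrArg (fun p => p.2.2) h
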